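-- pv_equiv track=rewrite | github.com/joshanashakya/dissertation | workspace/dataset/java-python/GeeksForGeeks/2229/A/2.py | productEqual
-- ===== SOURCE A (Python) =====
-- def productEqual(n):
--     if n < 10:
--         return False
--     prodOdd = 1; prodEven = 1
--
--     # Take two consecutive digits
--     # at a time
--     # First digit
--     while n > 0:
--         digit = n % 10
--         prodOdd *= digit
--         n = n//10
--
--         # If n becomes 0 then
--         # there's no more digit
--         if n == 0:
--             break;
--         digit = n % 10
--         prodEven *= digit
--         n = n//10
--
--     # If the products are equal
--     if prodOdd == prodEven:
--         return True
--
--     # If the products are not equal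
--     return False
-- ===== SOURCE B (Python) =====
-- def productEqual(n):
--     if n < 10:
--         return False
--     ds = []
--     while n > 0:
--         ds.append(n % 10)
--         n //= 10
--     return prod_alternate(ds) == prod_alternate(ds[1:])
--
--
-- def prod_alternate(l):
--     # product of l[0], l[2], l[4], ... by recursive slicing
--     if not l:
--         return 1
--     return l[0] * prod_alternate(l[2:])
-- ===== Notes on version B (the rewrite author's own statement) =====
-- stated objective: alternative
-- what changed: A interleaves both products in one imperative while-loop over the number itself (two digits per iteration with a mid-loop break); B first materializes the digit list, then computes the two products with a recursive every-other-element helper applied to the list and to its [1:] slice.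
import Mathlib
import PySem

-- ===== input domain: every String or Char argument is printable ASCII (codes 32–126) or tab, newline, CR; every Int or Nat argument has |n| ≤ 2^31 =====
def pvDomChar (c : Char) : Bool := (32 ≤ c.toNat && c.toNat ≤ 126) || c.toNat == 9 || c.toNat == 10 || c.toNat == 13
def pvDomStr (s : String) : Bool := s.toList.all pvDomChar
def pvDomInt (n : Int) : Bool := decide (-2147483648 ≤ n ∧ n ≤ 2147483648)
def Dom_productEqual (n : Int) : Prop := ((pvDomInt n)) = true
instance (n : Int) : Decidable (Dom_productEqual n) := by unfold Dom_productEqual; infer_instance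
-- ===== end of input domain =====

-- B materializes the digit list first, then compares the two alternating products computed
-- by a recursive every-other-element helper on the list and on its [1:] slice (objective:
-- alternative decomposition; same O(number of digits) cost).

-- ===== PORT A =====
-- literal port of A's interleaved while-loop (two digits per iteration, with the mid-loop break)
def productEqualLoopA (n prodOdd prodEven : Int) : Int × Int :=
  if _h : 0 < n then
    let digit := PySem.Int.mod n 10
    let po := prodOdd * digit
    let n1 := PySem.Int.floordiv n 10
    if _h0 : n1 = 0 then (po, prodEven)
    else
      let digit2 := PySem.Int.mod n1 10
      let pe := prodEven * digit2
      productEqualLoopA (PySem.Int.floordiv n1 10) po pe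
  else (prodOdd, prodEven)
termination_by n.toNat
decreasing_by
  simp only [PySem.Int.floordiv_eq_ediv_of_pos (by norm_num : (0:Int) < 10)] at *
  omega

def productEqual (n : Int) : Bool :=
  if n < 10 then false
  else
    let r := productEqualLoopA n 1 1
    if r.1 = r.2 then true else false

-- ===== PORT B =====
-- port of Source B's digit-collection while-loop: ds.append(n % 10); n //= 10
def digitsLoopB (n : Int) (ds : List Int) : List Int :=
  if _h : 0 < n then
    digitsLoopB (PySem.Int.floordiv n 10) (ds ++ [PySem.Int.mod n 10])
  else ds
termination_by n.toNat
decreasing_by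
  simp only [PySem.Int.floordiv_eq_ediv_of_pos (by norm_num : (0:Int) < 10)] at *
  omega

-- port of Source B's prod_alternate: 1 when empty, else l[0] * prod_alternate(l[2:])
def prodAlternate (l : List Int) : Int :=
  if _h : l = [] then 1
  else PySem.List.pyGetD l 0 0 * prodAlternate (PySem.List.slice l (some 2) none)
termination_by l.length
decreasing_by
  rw [PySem.List.slice_from l (a := 2) (by norm_num)]
  simp only [List.length_drop]
  cases l with
  | nil => exact absurd rfl _h
  | cons x t => simp

def productEqual_alt (n : Int) : Bool :=
  if n < 10 then false
  else
    let ds := digitsLoopB n []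
    decide (prodAlternate ds = prodAlternate (PySem.List.slice ds (some 1) none))

-- ===== PRECONDITION & SPEC =====
def Spec_productEqual (n : Int) (out : Bool) : Prop := out = productEqual_alt n
instance (n : Int) (out : Bool) : Decidable (Spec_productEqual n out) := by unfold Spec_productEqual; infer_instance

-- ===== CLAIM (what is proved, stated in full; the proofs are below) =====
def Claim_equal_productEqual : Prop := ∀ (n : Int), Dom_productEqual n → Spec_productEqual n (productEqual n)

-- ===== LEMMAS AND PROOFS =====

-- proof-side digit list of n, least-significant digit first
def digitsSpec (n : Int) : List Int :=
  if _h : 0 < n then PySem.Int.mod n 10 :: digitsSpec (PySem.Int.floordiv n 10) else []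
termination_by n.toNat
decreasing_by
  simp only [PySem.Int.floordiv_eq_ediv_of_pos (by norm_num : (0:Int) < 10)] at *
  omega

lemma digitsLoopB_eq : ∀ (k : Nat) (n : Int) (ds : List Int), n.toNat ≤ k →
    digitsLoopB n ds = ds ++ digitsSpec n := by
  intro k
  induction k with
  | zero =>
    intro n ds hk
    rw [digitsLoopB, digitsSpec]
    have hn : ¬ 0 < n := by omega
    simp [hn]
  | succ k ih =>
    intro n ds hk
    rw [digitsLoopB, digitsSpec]
    by_cases hn : 0 < n
    · simp only [dif_pos hn]
      rw [ih]
      · simp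
      · have := PySem.Int.floordiv_eq_ediv_of_pos (a := n) (by norm_num : (0:Int) < 10)
        omega
    · simp [hn]

lemma prodAlternate_nil : prodAlternate [] = 1 := by
  rw [prodAlternate]; simp

lemma prodAlternate_cons (x : Int) (l : List Int) :
    prodAlternate (x :: l) = x * prodAlternate l.tail := by
  rw [prodAlternate, PySem.List.slice_from (x :: l) (a := 2) (by norm_num)]
  simp [PySem.List.pyGetD_zero_cons]

-- A's loop computes the pair of alternating products of the digit list
lemma loopA_eq : ∀ (k : Nat) (n po pe : Int), n.toNat ≤ k →
    productEqualLoopA n po pe =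
      (po * prodAlternate (digitsSpec n), pe * prodAlternate (digitsSpec n).tail) := by
  intro k
  induction k with
  | zero =>
    intro n po pe hk
    have hn : ¬ 0 < n := by omega
    rw [productEqualLoopA, digitsSpec]
    simp [hn, prodAlternate_nil]
  | succ k ih =>
    intro n po pe hk
    by_cases hn : 0 < n
    · have e1 : digitsSpec n = PySem.Int.mod n 10 :: digitsSpec (PySem.Int.floordiv n 10) := by
        rw [digitsSpec]; simp only [dif_pos hn]
      rw [productEqualLoopA]
      simp only [dif_pos hn]
      have hdiv := PySem.Int.floordiv_eq_ediv_of_pos (a := n) (by norm_num : (0:Int) < 10)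
      by_cases h0 : PySem.Int.floordiv n 10 = 0
      · have e2 : digitsSpec (PySem.Int.floordiv n 10) = [] := by
          rw [h0, digitsSpec]; simp
        rw [dif_pos h0, e1, e2, prodAlternate_cons]
        simp [prodAlternate_nil]
      · rw [dif_neg h0]
        have hn1 : 0 < PySem.Int.floordiv n 10 := by omega
        have hdiv1 := PySem.Int.floordiv_eq_ediv_of_pos (a := PySem.Int.floordiv n 10)
          (by norm_num : (0:Int) < 10)
        have e2 : digitsSpec (PySem.Int.floordiv n 10) =
            PySem.Int.mod (PySem.Int.floordiv n 10) 10 ::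
              digitsSpec (PySem.Int.floordiv (PySem.Int.floordiv n 10) 10) := by
          rw [digitsSpec]; simp only [dif_pos hn1]
        rw [ih _ _ _ (by omega), e1, e2, prodAlternate_cons]
        simp only [List.tail_cons]
        rw [prodAlternate_cons]
        simp only [Prod.mk.injEq]
        constructor <;> ring
    · rw [productEqualLoopA, digitsSpec]
      simp [hn, prodAlternate_nil]

-- ===== VERDICT (by name: the statement is the Claim_ definition above) =====
theorem productEqual_spec : Claim_equal_productEqual := by
  intro n _
  unfold Spec_productEqual productEqual productEqual_alt
  by_cases hlt : n < 10
  · simp [hlt]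
  · simp only [if_neg hlt]
    rw [loopA_eq n.toNat n 1 1 le_rfl, digitsLoopB_eq n.toNat n [] le_rfl]
    simp only [List.nil_append, one_mul]
    simp only [PySem.List.slice_from (digitsSpec n) (a := 1) (by norm_num), Int.toNat_one,
      List.drop_one]
    by_cases he : prodAlternate (digitsSpec n) = prodAlternate (digitsSpec n).tail <;> simp [he]
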